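-- pv_equiv track=rewrite | github.com/NagendraBabuG/lotus | pip6_l.py | pair_strongest_with_weakest
-- ===== SOURCE A (Python) =====
-- def pair_strongest_with_weakest(scored_items):
--     sorted_items = sorted(scored_items, key=lambda x: x[1], reverse=True)
--     pipelines = []
--     i, j = 0, len(sorted_items) - 1
--
--     while i < j:
--         strong_techs = sorted_items[i][0]
--         weak_techs = sorted_items[j][0]
--
--         new_pipe = list(strong_techs) + list(weak_techs)
--         pipelines.append(new_pipe)
--
--         i += 1
--         j -= 1
--
--     if i == j:
--         mid_techs = sorted_items[i][0]
--         pipelines.append(list(mid_techs))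
--
--     return pipelines
-- ===== SOURCE B (Python) =====
-- def pair_strongest_with_weakest(scored_items):
--     ranked = sorted(scored_items, key=lambda item: -item[1])
--     def peel(seq):
--         if not seq:
--             return []
--         if len(seq) == 1:
--             return [list(seq[0][0])]
--         head, *middle, last = seq
--         return [list(head[0]) + list(last[0])] + peel(middle)
--     return peel(ranked)
-- ===== Notes on version B (the rewrite author's own statement) =====
-- stated objective: alternative
-- what changed: Replaced the index-walking while-loop over a reverse=True sort by a recursive peel that sorts with a negated key and structurally destructures head, *middle, last on each step, recursing on the shrinking middle list with no index arithmetic.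
import Mathlib
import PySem

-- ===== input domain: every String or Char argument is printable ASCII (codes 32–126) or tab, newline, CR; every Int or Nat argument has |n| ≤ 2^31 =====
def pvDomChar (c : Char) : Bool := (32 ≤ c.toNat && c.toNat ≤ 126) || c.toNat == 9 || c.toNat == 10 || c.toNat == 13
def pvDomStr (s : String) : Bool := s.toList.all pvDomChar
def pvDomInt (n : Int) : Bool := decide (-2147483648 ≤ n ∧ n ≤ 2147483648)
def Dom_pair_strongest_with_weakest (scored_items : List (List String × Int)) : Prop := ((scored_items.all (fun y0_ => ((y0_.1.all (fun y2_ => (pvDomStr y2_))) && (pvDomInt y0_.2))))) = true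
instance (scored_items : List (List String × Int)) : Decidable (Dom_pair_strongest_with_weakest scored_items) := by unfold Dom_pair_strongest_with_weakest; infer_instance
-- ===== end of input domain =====

-- B sorts by a negated key and recursively peels head/*middle*/last instead of A's
-- index-walking while loop over a reverse sort (objective: alternative; return value only).

-- ===== PORT A =====
-- A's while loop: indices i, j move inward over sorted_items, appending to pipelines (acc)
def pvLoopA (s : List (List String × Int)) (i j : Int) (acc : List (List String)) :
    List (List String) :=
  if _h : i < j then
    let strong_techs := ((PySem.List.pyGet? s i).getD ([], 0)).1  -- index always in range when reached
    let weak_techs := ((PySem.List.pyGet? s j).getD ([], 0)).1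
    pvLoopA s (i + 1) (j - 1) (acc ++ [strong_techs ++ weak_techs])
  else if i = j then
    acc ++ [((PySem.List.pyGet? s i).getD ([], 0)).1]
  else acc
termination_by (j - i).toNat
decreasing_by omega

def pair_strongest_with_weakest (scored_items : List (List String × Int)) :
    List (List String) :=
  let sorted_items := PySem.List.sorted scored_items (fun x => x.2) true
  pvLoopA sorted_items 0 ((sorted_items.length : Int) - 1) []

-- ===== PORT B =====
-- Source B's peel: empty → []; singleton → its techs; else head, *middle, last → pair head
-- with last and recurse on middle
-- structural recursion on a length bound (the recursion shrinks the list, not a tail)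
def pvPeelGo : Nat → List (List String × Int) → List (List String)
  | 0, _ => []
  | _ + 1, [] => []
  | _ + 1, [x] => [x.1]
  | n + 1, x :: r :: rest =>
      (x.1 ++ (((r :: rest).getLast?).getD ([], 0)).1) :: pvPeelGo n ((r :: rest).dropLast)

def pvPeel (seq : List (List String × Int)) : List (List String) :=
  pvPeelGo seq.length seq

def pair_strongest_with_weakest_alt (scored_items : List (List String × Int)) :
    List (List String) :=
  let ranked := PySem.List.sorted scored_items (fun item => -item.2) false
  pvPeel ranked

-- ===== PRECONDITION & SPEC =====
def Spec_pair_strongest_with_weakest (scored_items : List (List String × Int)) (out : List (List String)) : Prop := out = pair_strongest_with_weakest_alt scored_items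
instance (scored_items : List (List String × Int)) (out : List (List String)) : Decidable (Spec_pair_strongest_with_weakest scored_items out) := by unfold Spec_pair_strongest_with_weakest; infer_instance

-- ===== CLAIM (what is proved, stated in full; the proofs are below) =====
def Claim_equal_pair_strongest_with_weakest : Prop := ∀ (scored_items : List (List String × Int)), Dom_pair_strongest_with_weakest scored_items → Spec_pair_strongest_with_weakest scored_items (pair_strongest_with_weakest scored_items)

-- ===== LEMMAS AND PROOFS =====

-- A's reverse=True sort equals B's negated-key ascending sort (both stable)
lemma pv_sort_eq (xs : List (List String × Int)) :
    PySem.List.sorted xs (fun x => x.2) true =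
      PySem.List.sorted xs (fun item => -item.2) false := by
  rw [PySem.List.sorted_rev_eq_foldl_insertBy, PySem.List.sorted_eq_foldl_insertBy]
  have h : (fun (a b : List String × Int) => decide (b.2 < a.2)) =
      (fun (a b : List String × Int) => decide (-a.2 < -b.2)) := by
    funext a b
    rw [decide_eq_decide]
    omega
  rw [h]

-- the accumulator factors out of A's loop
lemma pvLoopA_acc (s : List (List String × Int)) :
    ∀ (k : Nat) (i j : Int) (acc : List (List String)), (j - i).toNat = k →
      pvLoopA s i j acc = acc ++ pvLoopA s i j [] := by
  intro k
  induction k using Nat.strong_induction_on with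
  | _ k ih =>
    intro i j acc h
    conv_lhs => rw [pvLoopA]
    conv_rhs => rw [pvLoopA]
    by_cases h1 : i < j
    · rw [dif_pos h1, dif_pos h1]
      show pvLoopA s (i + 1) (j - 1)
          (acc ++ [((PySem.List.pyGet? s i).getD ([], 0)).1 ++ ((PySem.List.pyGet? s j).getD ([], 0)).1]) =
        acc ++ pvLoopA s (i + 1) (j - 1)
          ([] ++ [((PySem.List.pyGet? s i).getD ([], 0)).1 ++ ((PySem.List.pyGet? s j).getD ([], 0)).1])
      rw [ih ((j - 1) - (i + 1)).toNat (by omega) (i + 1) (j - 1) _ rfl]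
      simp
      exact (ih ((j - 1) - (i + 1)).toNat (by omega) (i + 1) (j - 1)
        [((PySem.List.pyGet? s i).getD ([], 0)).1 ++ ((PySem.List.pyGet? s j).getD ([], 0)).1] rfl).symm
    · rw [dif_neg h1, dif_neg h1]
      by_cases h2 : i = j <;> simp [h2]

-- indexing 1 ≤ t ≤ m.length into x :: m ++ [y] hits m at t - 1
lemma pv_index_shift (x y : List String × Int) (m : List (List String × Int))
    (t : Int) (h1 : 1 ≤ t) (h2 : t ≤ (m.length : Int)) :
    PySem.List.pyGet? (x :: m ++ [y]) t = PySem.List.pyGet? m (t - 1) := by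
  obtain ⟨u, rfl⟩ : ∃ u : Nat, t = ((u + 1 : Nat) : Int) := ⟨(t - 1).toNat, by omega⟩
  have hu : u < m.length := by omega
  have e1 : ((u + 1 : Nat) : Int) - 1 = ((u : Nat) : Int) := by push_cast; ring
  rw [e1, PySem.List.pyGet?_natCast, PySem.List.pyGet?_natCast]
  simp [List.getElem?_append, hu]

-- shift x :: m ++ [y] → m
lemma pvLoopA_inner (x y : List String × Int) (m : List (List String × Int)) :
    ∀ (k : Nat) (i j : Int) (acc : List (List String)), (j - i).toNat = k →
      1 ≤ i → j ≤ (m.length : Int) →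
      pvLoopA (x :: m ++ [y]) i j acc = pvLoopA m (i - 1) (j - 1) acc := by
  intro k
  induction k using Nat.strong_induction_on with
  | _ k ih =>
    intro i j acc h hi hj
    conv_lhs => rw [pvLoopA]
    conv_rhs => rw [pvLoopA]
    by_cases h1 : i < j
    · rw [dif_pos h1, dif_pos (by omega : i - 1 < j - 1)]
      rw [pv_index_shift x y m i hi (by omega), pv_index_shift x y m j (by omega) hj]
      rw [ih ((j - 1) - (i + 1)).toNat (by omega) (i + 1) (j - 1) _ rfl (by omega) (by omega)]
      congr 1
      omega
    · rw [dif_neg h1, dif_neg (by omega : ¬ (i - 1 < j - 1))]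
      by_cases h2 : i = j
      · rw [if_pos h2, if_pos (by omega : i - 1 = j - 1)]
        rw [pv_index_shift x y m i hi (by omega)]
      · rw [if_neg h2, if_neg (by omega : ¬ (i - 1 = j - 1))]

-- B's peel computes A's loop on any list (fuel ≥ length suffices)
lemma pv_peel_go_eq :
    ∀ (k : Nat) (s : List (List String × Int)), s.length ≤ k →
      pvPeelGo k s = pvLoopA s 0 ((s.length : Int) - 1) [] := by
  intro k
  induction k using Nat.strong_induction_on with
  | _ k ih =>
    intro s hs
    match s with
    | [] =>
      cases k <;> (simp only [pvPeelGo]; rw [pvLoopA]; norm_num)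
    | [x] =>
      obtain ⟨n, rfl⟩ : ∃ n, k = n + 1 := ⟨k - 1, by simp at hs; omega⟩
      simp only [pvPeelGo]
      rw [pvLoopA]
      simp [PySem.List.pyGet?, PySem.List.pyIdx?]
    | x :: r :: rest =>
      obtain ⟨n, rfl⟩ : ∃ n, k = n + 1 := ⟨k - 1, by simp at hs; omega⟩
      simp only [pvPeelGo]
      set m := (r :: rest).dropLast with hm
      set y := (((r :: rest).getLast?).getD ([], 0)) with hy
      have hdec : x :: r :: rest = x :: m ++ [y] := by
        rw [hm, hy, List.getLast?_eq_some_getLast (by simp : r :: rest ≠ [])]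
        exact congrArg (x :: ·) (List.dropLast_append_getLast (by simp)).symm
      have hlen : (x :: r :: rest).length = m.length + 2 := by
        rw [hdec]; simp
      rw [hdec, pvLoopA]
      rw [dif_pos (by simp : (0 : Int) < ((x :: m ++ [y]).length : Int) - 1)]
      have hg0 : PySem.List.pyGet? (x :: m ++ [y]) 0 = some x := by
        rw [(by norm_num : (0 : Int) = ((0 : Nat) : Int)), PySem.List.pyGet?_natCast]
        simp
      have hgl : PySem.List.pyGet? (x :: m ++ [y]) (((x :: m ++ [y]).length : Int) - 1) = some y := by
        have e : ((x :: m ++ [y]).length : Int) - 1 = ((m.length + 1 : Nat) : Int) := by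
          simp only [List.length_cons, List.length_append, List.length_nil]
          omega
        rw [e, PySem.List.pyGet?_natCast]
        simp
      rw [hg0, hgl]
      simp only [Option.getD_some]
      rw [pvLoopA_inner x y m _ (0 + 1) (((x :: m ++ [y]).length : Int) - 1 - 1) _ rfl
            (by omega)
            (by simp only [List.length_cons, List.length_append, List.length_nil]; omega)]
      rw [pvLoopA_acc m _ _ _ _ rfl]
      have em : (0 : Int) + 1 - 1 = 0 := by ring
      have ej : ((x :: m ++ [y]).length : Int) - 1 - 1 - 1 = (m.length : Int) - 1 := by
        simp only [List.length_cons, List.length_append, List.length_nil]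
        omega
      rw [em, ej]
      rw [ih n (by omega) m (by
        simp only [hm, List.length_dropLast, List.length_cons]
        simp only [List.length_cons] at hs
        omega)]
      simp

-- ===== VERDICT (by name: the statement is the Claim_ definition above) =====
theorem pair_strongest_with_weakest_spec : Claim_equal_pair_strongest_with_weakest := by
  intro scored_items _
  unfold Spec_pair_strongest_with_weakest pair_strongest_with_weakest pair_strongest_with_weakest_alt
  rw [pv_sort_eq]
  exact (pv_peel_go_eq _ (PySem.List.sorted scored_items (fun item => -item.2) false) le_rfl).symm
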